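-- pv_equiv track=rewrite | github.com/FabianAlvaradoDonoso/adventofcode | 2015/solutions/day03.py | solution
-- ===== SOURCE A (Python) =====
-- def solution(data):
--     houses = [(0, 0)]
--
--     for direction in data:
--         x, y = houses[-1]
--
--         if direction == "^":
--             y += 1
--         elif direction == "v":
--             y -= 1
--         elif direction == ">":
--             x += 1
--         elif direction == "<":
--             x -= 1
--
--         houses.append((x, y))
--
--     return houses
-- ===== SOURCE B (Python) =====
-- def solution(data):
--     # Position after i moves is determined by the prefix alone:
--     # x = (# of '>') - (# of '<') in data[:i], y = (# of '^') - (# of 'v').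
--     return [
--         (data[:i].count(">") - data[:i].count("<"),
--          data[:i].count("^") - data[:i].count("v"))
--         for i in range(len(data) + 1)
--     ]
-- ===== Notes on version B (the rewrite author's own statement) =====
-- stated objective: alternative
-- what changed: Replaces the running-state scan (each position derived from the previous one) by a stateless closed form: position i is computed directly from the counts of the four direction characters in the prefix data[:i], with no accumulator at all; this trades speed (quadratic) for a per-index closed form.
import Mathlib
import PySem

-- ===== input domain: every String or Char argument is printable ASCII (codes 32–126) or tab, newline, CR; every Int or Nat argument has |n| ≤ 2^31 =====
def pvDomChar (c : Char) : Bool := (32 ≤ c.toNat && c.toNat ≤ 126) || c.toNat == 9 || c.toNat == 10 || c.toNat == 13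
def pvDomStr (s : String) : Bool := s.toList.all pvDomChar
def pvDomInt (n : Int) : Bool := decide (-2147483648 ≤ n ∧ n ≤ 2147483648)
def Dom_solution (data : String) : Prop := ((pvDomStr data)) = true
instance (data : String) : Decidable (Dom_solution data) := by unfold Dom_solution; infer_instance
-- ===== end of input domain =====

-- B replaces A's running-state scan by a stateless closed form: position i is the
-- pair of prefix character-count differences of data[:i] (alternative decomposition).

-- ===== PORT A =====
def solution (data : String) : List (Int × Int) :=
  data.toList.foldl
    (fun houses direction =>
      let p := (PySem.List.pyGet? houses (-1)).getD (0, 0)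
      let q :=
        if direction = '^' then (p.1, p.2 + 1)
        else if direction = 'v' then (p.1, p.2 - 1)
        else if direction = '>' then (p.1 + 1, p.2)
        else if direction = '<' then (p.1 - 1, p.2)
        else p
      houses ++ [q])
    [(0, 0)]

-- ===== PORT B =====
def solution_alt (data : String) : List (Int × Int) :=
  (PySem.List.pyRange 0 (PySem.Str.len data + 1) 1).map (fun i =>
    let pre := PySem.Str.slice data none (some i)
    ((PySem.Str.count pre ">" : Int) - (PySem.Str.count pre "<" : Int),
     (PySem.Str.count pre "^" : Int) - (PySem.Str.count pre "v" : Int)))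

-- ===== PRECONDITION & SPEC =====
def Spec_solution (data : String) (out : List (Int × Int)) : Prop := out = solution_alt data
instance (data : String) (out : List (Int × Int)) : Decidable (Spec_solution data out) := by unfold Spec_solution; infer_instance

-- ===== CLAIM (what is proved, stated in full; the proofs are below) =====
def Claim_equal_solution : Prop := ∀ (data : String), Dom_solution data → Spec_solution data (solution data)

-- ===== LEMMAS AND PROOFS =====

-- the net displacement of a list of moves, per coordinate
def solCnt (l : List Char) : Int × Int :=
  ((l.count '>' : Int) - (l.count '<' : Int), (l.count '^' : Int) - (l.count 'v' : Int))

def solStepA (p : Int × Int) (c : Char) : Int × Int :=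
  if c = '^' then (p.1, p.2 + 1)
  else if c = 'v' then (p.1, p.2 - 1)
  else if c = '>' then (p.1 + 1, p.2)
  else if c = '<' then (p.1 - 1, p.2)
  else p

def solScanA (p : Int × Int) : List Char → List (Int × Int)
  | [] => []
  | c :: cs => solStepA p c :: solScanA (solStepA p c) cs

-- A's fold is (0,0) followed by the scan of step states
lemma solFoldA (l : List Char) (acc : List (Int × Int)) (p : Int × Int)
    (h : acc.getLast? = some p) :
    l.foldl
      (fun houses direction =>
        let q := (PySem.List.pyGet? houses (-1)).getD (0, 0)
        let r :=
          if direction = '^' then (q.1, q.2 + 1)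
          else if direction = 'v' then (q.1, q.2 - 1)
          else if direction = '>' then (q.1 + 1, q.2)
          else if direction = '<' then (q.1 - 1, q.2)
          else q
        houses ++ [r]) acc
    = acc ++ solScanA p l := by
  induction l generalizing acc p with
  | nil => simp [solScanA]
  | cons c cs ih =>
    simp only [List.foldl_cons]
    rw [PySem.List.pyGet?_neg_one, h]
    simp only [Option.getD_some]
    exact (ih (acc ++ [solStepA p c]) (solStepA p c) (by simp)).trans
      (by simp [solScanA])

lemma solCnt_cons (c : Char) (l : List Char) :
    solCnt (c :: l) = ((solCnt [c]).1 + (solCnt l).1, (solCnt [c]).2 + (solCnt l).2) := by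
  simp only [solCnt, List.count_cons, List.count_nil, Prod.mk.injEq]
  constructor <;> split_ifs <;> push_cast <;> ring

lemma solStepA_cnt (p : Int × Int) (c : Char) :
    solStepA p c = (p.1 + (solCnt [c]).1, p.2 + (solCnt [c]).2) := by
  by_cases h1 : c = '^'
  · subst h1; simp [solStepA, solCnt]
  by_cases h2 : c = 'v'
  · subst h2; simp [solStepA, solCnt, sub_eq_add_neg]
  by_cases h3 : c = '>'
  · subst h3; simp [solStepA, solCnt]
  by_cases h4 : c = '<'
  · subst h4; simp [solStepA, solCnt, sub_eq_add_neg]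
  simp [solStepA, solCnt, h1, h2, h3, h4]

-- the scan elementwise is the prefix-count closed form
lemma solScanA_closed (l : List Char) (p : Int × Int) :
    solScanA p l
      = (List.range l.length).map
          (fun k => (p.1 + (solCnt (l.take (k + 1))).1, p.2 + (solCnt (l.take (k + 1))).2)) := by
  induction l generalizing p with
  | nil => simp [solScanA]
  | cons c cs ih =>
    rw [List.length_cons, List.range_succ_eq_map]
    simp only [List.map_cons, List.map_map]
    rw [solScanA, ih]
    congr 1
    · rw [solStepA_cnt]; simp
    · rw [solStepA_cnt]
      apply List.map_congr_left
      intro k _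
      simp only [Function.comp_apply, List.take_succ_cons, solCnt_cons c (cs.take (k + 1))]
      simp [add_assoc]

-- counting a single-character substring is List.count (no such lemma in PySem)
lemma solCountGo_singleton (c : Char) (s : List Char) (fuel acc : Nat)
    (h : s.length ≤ fuel) :
    PySem.Chars.count.go [c] fuel s acc = acc + s.count c := by
  induction fuel generalizing s acc with
  | zero =>
    have hs : s = [] := List.eq_nil_of_length_eq_zero (Nat.le_zero.mp h)
    subst hs; simp [PySem.Chars.count.go]
  | succ n ih =>
    cases s with
    | nil => simp [PySem.Chars.count.go]
    | cons a t =>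
      rw [PySem.Chars.count.go]
      by_cases hac : a = c
      · subst hac
        simp only [List.isPrefixOf, beq_self_eq_true, Bool.true_and,
          if_true, List.length_singleton, List.drop_one, List.tail_cons]
        rw [ih t (acc + 1) (by simpa using Nat.lt_succ_iff.mp (by simpa using h))]
        simp only [List.count_cons, beq_self_eq_true, if_true]
        omega
      · have hp : ([c].isPrefixOf (a :: t)) = false := by
          simp only [List.isPrefixOf, Bool.and_eq_false_iff, beq_eq_false_iff_ne, ne_eq]
          left; exact fun hh => hac hh.symm
        rw [hp, if_neg (by simp)]
        rw [ih t acc (by simpa using Nat.lt_succ_iff.mp (by simpa using h))]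
        rw [List.count_cons]
        simp [show ¬ (a == c) = true from by simpa using hac]

lemma solCount_singleton (s : List Char) (c : Char) :
    PySem.Chars.count s [c] = s.count c := by
  rw [PySem.Chars.count]
  simp only [List.isEmpty_cons, if_false, Bool.false_eq_true]
  simpa using solCountGo_singleton c s s.length 0 le_rfl

-- B's map body at a natural index is the prefix-count pair
lemma solB_body (data : String) (k : Nat) :
    ((PySem.Str.count (PySem.Str.slice data none (some (k : Int))) ">" : Int)
       - (PySem.Str.count (PySem.Str.slice data none (some (k : Int))) "<" : Int),
     (PySem.Str.count (PySem.Str.slice data none (some (k : Int))) "^" : Int)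
       - (PySem.Str.count (PySem.Str.slice data none (some (k : Int))) "v" : Int))
    = solCnt (data.toList.take k) := by
  have hs : (PySem.Str.slice data none (some (k : Int))).toList = data.toList.take k := by
    rw [PySem.Str.toList_slice, PySem.Chars.slice_eq_listSlice, PySem.List.slice_to_natCast]
  have hc : ∀ c : Char, PySem.Str.count (PySem.Str.slice data none (some (k : Int)))
      (String.ofList [c]) = (data.toList.take k).count c := by
    intro c
    rw [PySem.Str.count_eq, hs, String.toList_ofList, solCount_singleton]
  rw [show (">" : String) = String.ofList ['>'] from rfl,
      show ("<" : String) = String.ofList ['<'] from rfl,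
      show ("^" : String) = String.ofList ['^'] from rfl,
      show ("v" : String) = String.ofList ['v'] from rfl,
      hc, hc, hc, hc]
  simp only [solCnt]

-- closed forms of both ports
lemma solA_closed (data : String) :
    solution data
      = (List.range (data.toList.length + 1)).map (fun k => solCnt (data.toList.take k)) := by
  unfold solution
  rw [solFoldA data.toList [(0, 0)] (0, 0) rfl, solScanA_closed]
  rw [List.range_succ_eq_map, List.map_cons, List.map_map, List.singleton_append]
  refine congrArg₂ List.cons ?_ (List.map_congr_left ?_)
  · simp [solCnt]
  · intro k _
    simp

lemma solB_closed (data : String) :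
    solution_alt data
      = (List.range (data.toList.length + 1)).map (fun k => solCnt (data.toList.take k)) := by
  unfold solution_alt
  rw [PySem.Str.len_eq,
      show ((data.toList.length : Int) + 1) = ((data.toList.length + 1 : Nat) : Int) by push_cast; ring,
      PySem.List.pyRange_zero_natCast, List.map_map]
  apply List.map_congr_left
  intro k _
  simp only [Function.comp_apply]
  exact solB_body data k

-- ===== VERDICT (by name: the statement is the Claim_ definition above) =====
theorem solution_spec : Claim_equal_solution := by
  intro data _
  unfold Spec_solution
  rw [solA_closed, solB_closed]
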